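-- pv_equiv track=rewrite | github.com/renash2me/word-games | layout_generator.py | run_length_at
-- ===== SOURCE A (Python) =====
-- def run_length_at(grid, r, c, direction, rows, cols):
--     if grid[r][c] == '#':
--         return 0
--     if direction == 'H':
--         l = c
--         while l > 0 and grid[r][l-1] == '.':
--             l -= 1
--         rt = c
--         while rt < cols-1 and grid[r][rt+1] == '.':
--             rt += 1
--         return rt - l + 1
--     else:
--         u = r
--         while u > 0 and grid[u-1][c] == '.':
--             u -= 1
--         d = r
--         while d < rows-1 and grid[d+1][c] == '.':
--             d += 1
--         return d - u + 1
-- ===== SOURCE B (Python) =====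
-- def _dots(cells):
--     n = 0
--     for x in cells:
--         if x != '.':
--             break
--         n += 1
--     return n
--
--
-- def run_length_at(grid, r, c, direction, rows, cols):
--     if grid[r][c] == '#':
--         return 0
--     if direction == 'H':
--         line, pos, stop = grid[r], c, cols
--     else:
--         line, pos, stop = [row[c] for row in grid], r, rows
--     return _dots(reversed(line[:pos])) + 1 + _dots(line[pos + 1:stop])
-- ===== Notes on version B (the rewrite author's own statement) =====
-- stated objective: idiomatic
-- what changed: Instead of walking two boundary cursors with while loops in the grid, B materializes the relevant 1-D line (the row, or the column built from the rows), splits it at the center with slices (capping the right side at the cols/rows bound), and counts the leading dots of each side with one prefix-count helper.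
-- outside the precondition, e.g. on run_length_at([['.', '.']], 0, -1, 'H', 1, 2): A returns 3, B returns 4; on run_length_at([['.'], ['.']], -1, 0, 'V', 2, 1): A returns 3, B returns 4; on run_length_at([['.', '.'], ['x']], 0, 1, 'V', 1, 2): A returns 1, B raises IndexError
import Mathlib
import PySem

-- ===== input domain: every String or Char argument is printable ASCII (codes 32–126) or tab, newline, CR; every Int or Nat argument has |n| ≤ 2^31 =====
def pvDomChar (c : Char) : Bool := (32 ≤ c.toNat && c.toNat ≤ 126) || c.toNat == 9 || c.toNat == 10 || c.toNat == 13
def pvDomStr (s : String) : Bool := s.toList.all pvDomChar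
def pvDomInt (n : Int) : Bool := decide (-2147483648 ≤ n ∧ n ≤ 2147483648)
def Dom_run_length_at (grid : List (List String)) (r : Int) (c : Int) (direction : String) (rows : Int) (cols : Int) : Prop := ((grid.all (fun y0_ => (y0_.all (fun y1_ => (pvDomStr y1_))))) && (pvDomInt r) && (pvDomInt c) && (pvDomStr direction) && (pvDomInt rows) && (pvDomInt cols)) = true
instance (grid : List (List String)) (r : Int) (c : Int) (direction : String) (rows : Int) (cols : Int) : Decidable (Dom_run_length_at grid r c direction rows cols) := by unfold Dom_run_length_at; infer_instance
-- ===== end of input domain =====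

-- B replaces A's two boundary-walking while loops by slicing the materialized 1-D line at the
-- center (capping the right side by the cols/rows bound) and counting the leading dots of each
-- side (idiomatic decomposition; same cost).

-- ===== PORT A =====
-- grid[i][c] (and, with j the column index, row[j]) read with a default; inside Pre_ every
-- read the scans perform is in range, so the default is never produced.
def pvCellV (grid : List (List String)) (c : Int) (i : Int) : String :=
  (PySem.List.pyGet? ((PySem.List.pyGet? grid i).getD []) c).getD ""

def pvCellH (row : List String) (j : Int) : String :=
  (PySem.List.pyGet? row j).getD ""

-- 'while l > 0 and f(l-1) == '.': l -= 1'  (f abstracts the cell read of the H/V branch)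
def leftScan (f : Int → String) (l : Int) : Int :=
  if h : 0 < l ∧ f (l - 1) = "." then leftScan f (l - 1) else l
termination_by l.toNat
decreasing_by omega

-- 'while rt < hi-1 and f(rt+1) == '.': rt += 1'
def rightScan (f : Int → String) (rt : Int) (hi : Int) : Int :=
  if h : rt < hi - 1 ∧ f (rt + 1) = "." then rightScan f (rt + 1) hi else rt
termination_by (hi - 1 - rt).toNat
decreasing_by omega

def run_length_at (grid : List (List String)) (r : Int) (c : Int) (direction : String) (rows : Int) (cols : Int) : Int :=
  if pvCellV grid c r = "#" then 0
  else if direction = "H" then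
    let f := pvCellH ((PySem.List.pyGet? grid r).getD [])
    rightScan f c cols - leftScan f c + 1
  else
    rightScan (pvCellV grid c) r rows - leftScan (pvCellV grid c) r + 1

-- ===== PORT B =====
-- _dots: count of leading '.' cells
def pvDots : List String → Int
  | [] => 0
  | x :: xs => if x ≠ "." then 0 else 1 + pvDots xs

def run_length_at_alt (grid : List (List String)) (r : Int) (c : Int) (direction : String) (rows : Int) (cols : Int) : Int :=
  if pvCellV grid c r = "#" then 0
  else
    let lp : List String × Int × Int :=
      if direction = "H" then
        ((PySem.List.pyGet? grid r).getD [], c, cols)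
      else
        (grid.map (fun row => (PySem.List.pyGet? row c).getD ""), r, rows)
    pvDots (PySem.List.slice lp.1 none (some lp.2.1)).reverse + 1 +
      pvDots (PySem.List.slice lp.1 (some (lp.2.1 + 1)) (some lp.2.2))

-- ===== PRECONDITION & SPEC =====
-- Pre_ admits the always-safe '#'-center case and, per direction, the coordinate/bound
-- combinations on which A's scans provably stay in range and match B's slice counts (in-range
-- centers with an in-range or blocked bound, negative bounds that stop the scan at once, and
-- negative wrapped centers whose both neighbours stop it at once); it excludes the remaining
-- wraparound/ragged corners, where A can raise IndexError mid-run or return a value mixing two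
-- positions, though on some such inputs A still returns (see the cited excluded examples).
def Pre_run_length_at (grid : List (List String)) (r : Int) (c : Int) (direction : String) (rows : Int) (cols : Int) : Prop :=
  ((PySem.List.pyGet? grid r).bind (fun row => PySem.List.pyGet? row c) = some "#")
  ∨ (direction = "H" ∧ PySem.Raise.InRange grid.length r ∧
      ((0 ≤ c ∧ c < ((((PySem.List.pyGet? grid r).getD []).length : Nat) : Int) ∧
         ((0 ≤ cols ∧
            (cols ≤ ((((PySem.List.pyGet? grid r).getD []).length : Nat) : Int) ∨
              ∃ x ∈ ((PySem.List.pyGet? grid r).getD []).drop (c.toNat + 1), x ≠ ".")) ∨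
          (cols < 0 ∧ ((((PySem.List.pyGet? grid r).getD []).length : Nat) : Int) + cols ≤ c + 1)))
       ∨ (c < 0 ∧ -((((PySem.List.pyGet? grid r).getD []).length : Nat) : Int) ≤ c ∧
           (c = -((((PySem.List.pyGet? grid r).getD []).length : Nat) : Int) ∨
             pvCellH ((PySem.List.pyGet? grid r).getD []) (c - 1) ≠ ".") ∧
           (pvCellH ((PySem.List.pyGet? grid r).getD []) (c + 1) ≠ "." ∨
             (cols - 1 ≤ c ∧
               PySem.List.clampIdx ((PySem.List.pyGet? grid r).getD []).length cols ≤
                 PySem.List.clampIdx ((PySem.List.pyGet? grid r).getD []).length (c + 1))))))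
  ∨ (direction ≠ "H" ∧ (∀ row ∈ grid, PySem.Raise.InRange row.length c) ∧
      ((0 ≤ r ∧ r < (grid.length : Int) ∧
         ((0 ≤ rows ∧
            (rows ≤ (grid.length : Int) ∨
              ∃ row' ∈ grid.drop (r.toNat + 1), (PySem.List.pyGet? row' c).getD "" ≠ ".")) ∨
          (rows < 0 ∧ (grid.length : Int) + rows ≤ r + 1)))
       ∨ (r < 0 ∧ -(grid.length : Int) ≤ r ∧
           (r = -(grid.length : Int) ∨ pvCellV grid c (r - 1) ≠ ".") ∧
           (pvCellV grid c (r + 1) ≠ "." ∨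
             (rows - 1 ≤ r ∧
               PySem.List.clampIdx grid.length rows ≤ PySem.List.clampIdx grid.length (r + 1))))))
instance (grid : List (List String)) (r : Int) (c : Int) (direction : String) (rows : Int) (cols : Int) : Decidable (Pre_run_length_at grid r c direction rows cols) := by unfold Pre_run_length_at; infer_instance

def pvWitness_run_length_at : List (List String) × Int × Int × String × Int × Int :=
  ([[".", "#"], [".", "."]], 0, 0, "H", 2, 2)

def Spec_run_length_at (grid : List (List String)) (r : Int) (c : Int) (direction : String) (rows : Int) (cols : Int) (out : Int) : Prop := out = run_length_at_alt grid r c direction rows cols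
instance (grid : List (List String)) (r : Int) (c : Int) (direction : String) (rows : Int) (cols : Int) (out : Int) : Decidable (Spec_run_length_at grid r c direction rows cols out) := by unfold Spec_run_length_at; infer_instance

-- ===== CLAIM (what is proved, stated in full; the proofs are below) =====
def Claim_equal_run_length_at : Prop := ∀ (grid : List (List String)) (r : Int) (c : Int) (direction : String) (rows : Int) (cols : Int), Dom_run_length_at grid r c direction rows cols → Pre_run_length_at grid r c direction rows cols → Spec_run_length_at grid r c direction rows cols (run_length_at grid r c direction rows cols)

-- ===== LEMMAS AND PROOFS =====

-- leftScan over an accessor that agrees with 'line' returns l minus the dot-run just left of l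
lemma left_eq (f : Int → String) (line : List String) (n : Nat)
    (hn : n ≤ line.length)
    (hf : ∀ j : Nat, j < line.length → f j = line.getD j "") :
    leftScan f n = (n : Int) - pvDots ((line.take n).reverse) := by
  induction n with
  | zero => rw [leftScan]; simp [pvDots]
  | succ n ih =>
    have hlt : n < line.length := by omega
    have hcast : ((n + 1 : Nat) : Int) - 1 = (n : Nat) := by push_cast; ring
    have hfv : f (((n + 1 : Nat) : Int) - 1) = line.getD n "" := by
      rw [hcast, hf n hlt]
    have htake : (line.take (n + 1)).reverse = line.getD n "" :: (line.take n).reverse := by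
      rw [List.take_succ, List.getElem?_eq_getElem hlt, List.getD_eq_getElem line "" hlt]
      simp
    rw [leftScan]
    by_cases hdot : line.getD n "" = "."
    · rw [dif_pos ⟨by positivity, by rw [hfv, hdot]⟩, hcast, ih (by omega), htake]
      simp only [pvDots, hdot]
      simp
      ring
    · rw [dif_neg (by rw [hfv]; tauto), htake]
      simp only [pvDots, ne_eq, hdot, not_false_eq_true, if_true]
      omega

-- rightScan returns rt plus the dot-run just right of rt, when the bound hi is the line's
-- length or a non-dot blocker sits right of rt (so the scan never runs past the line)
lemma right_eq (f : Int → String) (line : List String) (rt : Nat) (hi : Int)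
    (hhi : (line.length : Int) ≤ hi)
    (hblock : hi = (line.length : Int) ∨ ∃ x ∈ line.drop (rt + 1), x ≠ ".")
    (hf : ∀ j : Nat, j < line.length → f j = line.getD j "") :
    rightScan f rt hi = (rt : Int) + pvDots (line.drop (rt + 1)) := by
  suffices H : ∀ k rt : Nat, (hi = (line.length : Int) ∨ ∃ x ∈ line.drop (rt + 1), x ≠ ".") →
      line.length - rt = k → rightScan f rt hi = (rt : Int) + pvDots (line.drop (rt + 1)) by
    exact H _ rt hblock rfl
  intro k
  induction k with
  | zero =>
    intro rt hb hk
    have hd : line.drop (rt + 1) = [] := List.drop_eq_nil_of_le (by omega)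
    rcases hb with hb | ⟨x, hx, _⟩
    · rw [rightScan, dif_neg (by omega), hd]
      simp [pvDots]
    · rw [hd] at hx; simp at hx
  | succ k ih =>
    intro rt hb hk
    by_cases hlt : rt + 1 < line.length
    · have hfv : f ((rt : Int) + 1) = line.getD (rt + 1) "" := by
        have := hf (rt + 1) hlt
        rw [← this]; push_cast; ring_nf
      have hdrop : line.drop (rt + 1) = line.getD (rt + 1) "" :: line.drop (rt + 2) := by
        rw [List.drop_eq_getElem_cons hlt, List.getD_eq_getElem line "" hlt]
      rw [rightScan]
      by_cases hdot : line.getD (rt + 1) "" = "."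
      · rw [dif_pos ⟨by omega, by rw [hfv, hdot]⟩]
        have hb' : hi = (line.length : Int) ∨ ∃ x ∈ line.drop (rt + 1 + 1), x ≠ "." := by
          rcases hb with hb | ⟨x, hx, hxne⟩
          · exact Or.inl hb
          · rw [hdrop] at hx
            rcases List.mem_cons.mp hx with hx | hx
            · exact absurd (hx ▸ hdot) hxne
            · exact Or.inr ⟨x, hx, hxne⟩
        have hc : (rt : Int) + 1 = ((rt + 1 : Nat) : Int) := by push_cast; ring
        rw [hc, ih (rt + 1) hb' (by omega), hdrop]
        simp only [pvDots, hdot]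
        simp
        ring
      · rw [dif_neg (by rw [hfv]; tauto), hdrop]
        simp only [pvDots, ne_eq, hdot, not_false_eq_true, if_true]
        omega
    · have hd : line.drop (rt + 1) = [] := List.drop_eq_nil_of_le (by omega)
      rcases hb with hb | ⟨x, hx, _⟩
      · rw [rightScan, dif_neg (by omega), hd]
        simp [pvDots]
      · rw [hd] at hx; simp at hx

-- the scan interval [pos-left, pos+right] has the same total as B's two slice counts
lemma assemble (f : Int → String) (line : List String) (pos : Int) (hi : Int)
    (h0 : 0 ≤ pos) (h0hi : 0 ≤ hi) (hlt : pos.toNat < line.length)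
    (hblock : hi ≤ (line.length : Int) ∨ ∃ x ∈ line.drop (pos.toNat + 1), x ≠ ".")
    (hf : ∀ j : Nat, j < line.length → f j = line.getD j "") :
    rightScan f pos hi - leftScan f pos + 1 =
      pvDots (PySem.List.slice line none (some pos)).reverse + 1 +
        pvDots (PySem.List.slice line (some (pos + 1)) (some hi)) := by
  have hfL : ∀ j : Nat, j < (line.take hi.toNat).length → f j = (line.take hi.toNat).getD j "" := by
    intro j hj
    rw [List.length_take] at hj
    rw [hf j (by omega), List.getD_eq_getElem?_getD, List.getD_eq_getElem?_getD,
      List.getElem?_take_of_lt (by omega)]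
  have hhiL : ((line.take hi.toNat).length : Int) ≤ hi := by
    rw [List.length_take]; omega
  have hblockL : hi = ((line.take hi.toNat).length : Int) ∨
      ∃ x ∈ (line.take hi.toNat).drop (pos.toNat + 1), x ≠ "." := by
    by_cases h2 : hi ≤ (line.length : Int)
    · left; rw [List.length_take]; omega
    · have hwhole : line.take hi.toNat = line := List.take_of_length_le (by omega)
      rcases hblock with hblock | ⟨x, hx, hxne⟩
      · omega
      · right; exact ⟨x, by rw [hwhole]; exact hx, hxne⟩
  have hR := right_eq f (line.take hi.toNat) pos.toNat hi hhiL hblockL hfL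
  have hL := left_eq f line pos.toNat (by omega) hf
  have hslice : PySem.List.slice line (some (pos + 1)) (some hi) =
      (line.take hi.toNat).drop (pos.toNat + 1) := by
    rw [PySem.List.slice_toNat line (by omega : (0:Int) ≤ pos + 1) h0hi]
    rw [List.drop_take]
    have h1 : (pos + 1).toNat = pos.toNat + 1 := by omega
    rw [h1]
  have hp : pos = ((pos.toNat : Nat) : Int) := by omega
  rw [PySem.List.slice_to line h0, hslice, hp, hL, hR]
  simp only [Int.toNat_natCast]
  ring

-- when the right bound hi is negative the scan cannot move and B's capped slice is empty
lemma assemble_stop (f : Int → String) (line : List String) (pos : Int) (hi : Int)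
    (h0 : 0 ≤ pos) (hlt : pos.toNat < line.length) (hhineg : hi < 0)
    (hstop : (line.length : Int) + hi ≤ pos + 1)
    (hf : ∀ j : Nat, j < line.length → f j = line.getD j "") :
    rightScan f pos hi - leftScan f pos + 1 =
      pvDots (PySem.List.slice line none (some pos)).reverse + 1 +
        pvDots (PySem.List.slice line (some (pos + 1)) (some hi)) := by
  have hr : rightScan f pos hi = pos := by rw [rightScan, dif_neg (by omega)]
  have hempty : PySem.List.slice line (some (pos + 1)) (some hi) = [] := by
    apply List.eq_nil_of_length_eq_zero
    rw [PySem.List.length_slice]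
    unfold PySem.List.clampIdx
    split_ifs <;> omega
  have hL := left_eq f line pos.toNat (by omega) hf
  have hp : pos = ((pos.toNat : Nat) : Int) := by omega
  rw [PySem.List.slice_to line h0, hempty, hr, hp, hL]
  simp only [pvDots, Int.toNat_natCast]
  ring

-- a list whose head is not '.' (or which is empty) has no leading dots
lemma pvDots_take_rev_zero (l : List String) (m : Nat) (hm : m ≤ l.length)
    (h : m = 0 ∨ l.getD (m - 1) "" ≠ ".") : pvDots ((l.take m).reverse) = 0 := by
  cases m with
  | zero => simp [pvDots]
  | succ p =>
    have hp : p < l.length := by omega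
    have ht : (l.take (p + 1)).reverse = l.getD p "" :: (l.take p).reverse := by
      rw [List.take_succ, List.getElem?_eq_getElem hp, List.getD_eq_getElem l "" hp]
      simp
    rcases h with h | h
    · exact absurd h (by omega)
    · have h' : l.getD p "" ≠ "." := by simpa using h
      rw [ht]
      simp only [pvDots, ne_eq, h', not_false_eq_true, if_true]

lemma pvDots_slice_zero (xs : List String) (aa bb : Int)
    (h : PySem.List.clampIdx xs.length bb ≤ PySem.List.clampIdx xs.length aa ∨
      xs.getD (PySem.List.clampIdx xs.length aa) "" ≠ ".") :
    pvDots (PySem.List.slice xs (some aa) (some bb)) = 0 := by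
  have hs : PySem.List.slice xs (some aa) (some bb) =
      (xs.drop (PySem.List.clampIdx xs.length aa)).take
        (PySem.List.clampIdx xs.length bb - PySem.List.clampIdx xs.length aa) := rfl
  rw [hs]
  by_cases hts : PySem.List.clampIdx xs.length bb ≤ PySem.List.clampIdx xs.length aa
  · have h0 : PySem.List.clampIdx xs.length bb - PySem.List.clampIdx xs.length aa = 0 := by omega
    rw [h0]
    simp [pvDots]
  · rcases h with h | h
    · exact absurd h hts
    · by_cases hsl : PySem.List.clampIdx xs.length aa < xs.length
      · rw [List.drop_eq_getElem_cons hsl]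
        obtain ⟨u, hu⟩ : ∃ u, PySem.List.clampIdx xs.length bb - PySem.List.clampIdx xs.length aa = u + 1 :=
          ⟨PySem.List.clampIdx xs.length bb - PySem.List.clampIdx xs.length aa - 1, by omega⟩
        rw [hu, List.take_succ_cons]
        have hx : xs[PySem.List.clampIdx xs.length aa] ≠ "." := by
          rw [← List.getD_eq_getElem xs "" hsl]; exact h
        simp [pvDots, hx]
      · rw [List.drop_eq_nil_of_le (by omega)]
        simp [pvDots]

-- negative center: neither scan moves and both of B's slices count no dots
lemma assemble_imm (f : Int → String) (line : List String) (pos : Int) (hi : Int)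
    (hneg : pos < 0) (hin : -(line.length : Int) ≤ pos)
    (hfneg : ∀ i : Int, -(line.length : Int) ≤ i → i < 0 →
      f i = line.getD ((line.length : Int) + i).toNat "")
    (hf0 : 0 < line.length → f 0 = line.getD 0 "")
    (hleft : pos = -(line.length : Int) ∨ f (pos - 1) ≠ ".")
    (hright : f (pos + 1) ≠ "." ∨ (hi - 1 ≤ pos ∧
      PySem.List.clampIdx line.length hi ≤ PySem.List.clampIdx line.length (pos + 1))) :
    rightScan f pos hi - leftScan f pos + 1 =
      pvDots (PySem.List.slice line none (some pos)).reverse + 1 +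
        pvDots (PySem.List.slice line (some (pos + 1)) (some hi)) := by
  have hn0 : 0 < line.length := by omega
  have hA1 : leftScan f pos = pos := by
    rw [leftScan, dif_neg (fun hh => absurd hh.1 (by omega))]
  have hA2 : rightScan f pos hi = pos := by
    rw [rightScan]
    rcases hright with h | ⟨h1, _⟩
    · exact dif_neg (fun hh => h hh.2)
    · exact dif_neg (fun hh => absurd hh.1 (by omega))
  have hBL : pvDots (PySem.List.slice line none (some pos)).reverse = 0 := by
    have hk : 0 < (-pos).toNat := by omega
    have hpe : pos = -(((-pos).toNat : Nat) : Int) := by omega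
    rw [hpe, PySem.List.slice_to_neg_natCast line (-pos).toNat hk]
    apply pvDots_take_rev_zero _ _ (by omega)
    by_cases hpl : pos = -(line.length : Int)
    · left; omega
    · right
      rcases hleft with h | h
      · exact absurd h hpl
      · have hf' := hfneg (pos - 1) (by omega) (by omega)
        have heq : ((line.length : Int) + (pos - 1)).toNat = line.length - (-pos).toNat - 1 := by
          omega
        rw [heq] at hf'
        rw [← hf']
        exact h
  have hBR : pvDots (PySem.List.slice line (some (pos + 1)) (some hi)) = 0 := by
    apply pvDots_slice_zero
    rcases hright with h | ⟨_, h2⟩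
    · right
      by_cases hp0 : pos + 1 = 0
      · have hc0 : PySem.List.clampIdx line.length (pos + 1) = 0 := by
          rw [hp0]; unfold PySem.List.clampIdx; split_ifs <;> omega
        rw [hc0, ← hf0 hn0, ← hp0]
        exact h
      · have hc1 : PySem.List.clampIdx line.length (pos + 1) =
            ((line.length : Int) + (pos + 1)).toNat := by
          unfold PySem.List.clampIdx; split_ifs <;> omega
        rw [hc1, ← hfneg (pos + 1) (by omega) (by omega)]
        exact h
    · left; exact h2
  rw [hA1, hA2, hBL, hBR]
  ring

-- wrapped reads of A's accessors agree with the materialized line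
lemma cellH_neg (row : List String) (i : Int) (h1 : -(row.length : Int) ≤ i) (h2 : i < 0) :
    pvCellH row i = row.getD ((row.length : Int) + i).toNat "" := by
  unfold pvCellH
  have hk0 : 0 < (-i).toNat := by omega
  have hkn : (-i).toNat ≤ row.length := by omega
  have hpe : i = -(((-i).toNat : Nat) : Int) := by omega
  rw [hpe, PySem.List.pyGet?_neg_natCast row (-i).toNat hk0 hkn, List.getD_eq_getElem?_getD]
  have heq : row.length - (-i).toNat = ((row.length : Int) + -(((-i).toNat : Nat) : Int)).toNat := by
    omega
  rw [heq]

lemma cellH_zero (row : List String) : pvCellH row 0 = row.getD 0 "" := by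
  unfold pvCellH
  rw [PySem.List.pyGet?_zero, List.getD_eq_getElem?_getD]

lemma cellV_col (grid : List (List String)) (c : Int) (m : Nat) (hm : m < grid.length) :
    pvCellV grid c (m : Int) =
      (grid.map (fun row => (PySem.List.pyGet? row c).getD "")).getD m "" := by
  unfold pvCellV
  rw [PySem.List.pyGet?_eq_some_getElem grid (by omega) (by exact_mod_cast hm)]
  rw [List.getD_eq_getElem?_getD, List.getElem?_map, List.getElem?_eq_getElem hm]
  simp

lemma cellV_neg (grid : List (List String)) (c : Int) (i : Int)
    (h1 : -(grid.length : Int) ≤ i) (h2 : i < 0) :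
    pvCellV grid c i =
      (grid.map (fun row => (PySem.List.pyGet? row c).getD "")).getD
        ((grid.length : Int) + i).toNat "" := by
  have hm : ((grid.length : Int) + i).toNat < grid.length := by omega
  have hcell : PySem.List.pyGet? grid i = PySem.List.pyGet? grid (((grid.length : Int) + i).toNat) := by
    have hk0 : 0 < (-i).toNat := by omega
    have hkn : (-i).toNat ≤ grid.length := by omega
    have hpe : i = -(((-i).toNat : Nat) : Int) := by omega
    rw [hpe, PySem.List.pyGet?_neg_natCast grid (-i).toNat hk0 hkn, PySem.List.pyGet?_natCast]
    congr 1
    omega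
  unfold pvCellV
  rw [hcell]
  have := cellV_col grid c (((grid.length : Int) + i).toNat) hm
  unfold pvCellV at this
  exact this

theorem run_length_at_spec : Claim_equal_run_length_at := by
  intro grid r c direction rows cols _ hpre
  unfold Spec_run_length_at run_length_at run_length_at_alt
  rcases hpre with hsharp | ⟨hdir, _hinr, hcases⟩ | ⟨hdir, _hc, hcases⟩
  · have hh : pvCellV grid c r = "#" := by
      rcases Option.bind_eq_some_iff.mp hsharp with ⟨row, hrow, hcell⟩
      unfold pvCellV
      rw [hrow]
      simp [hcell]
    simp [hh]
  · by_cases hhash : pvCellV grid c r = "#"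
    · simp [hhash]
    · simp only [if_neg hhash, if_pos hdir]
      set row : List String := (PySem.List.pyGet? grid r).getD [] with hrow
      have hf : ∀ j : Nat, j < row.length → pvCellH row j = row.getD j "" := by
        intro j hj
        unfold pvCellH
        rw [PySem.List.pyGet?_natCast, List.getD_eq_getElem?_getD]
      rcases hcases with ⟨hc0, hclen, hblk⟩ | ⟨hcneg, hcin, hL, hR⟩
      · rcases hblk with ⟨hcols0, hblk⟩ | ⟨hneg, hstop⟩
        · exact assemble (pvCellH row) row c cols hc0 hcols0 (by omega) hblk hf
        · exact assemble_stop (pvCellH row) row c cols hc0 (by omega) hneg (by omega) hf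
      · exact assemble_imm (pvCellH row) row c cols hcneg hcin
          (fun i h1 h2 => cellH_neg row i h1 h2) (fun _ => cellH_zero row) hL hR
  · by_cases hhash : pvCellV grid c r = "#"
    · simp [hhash]
    · simp only [if_neg hhash, if_neg hdir]
      set col : List String := grid.map (fun row => (PySem.List.pyGet? row c).getD "")
        with hcol
      have hlen : col.length = grid.length := by
        rw [hcol, List.length_map]
      have hf : ∀ j : Nat, j < col.length → pvCellV grid c j = col.getD j "" := by
        intro j hj
        rw [hlen] at hj
        exact cellV_col grid c j hj
      rcases hcases with ⟨hr0, hrr, hblk⟩ | ⟨hrneg, hrin, hL, hR⟩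
      · rcases hblk with ⟨hrows0, hblk2⟩ | ⟨hneg, hstop⟩
        · have hblock : rows ≤ (col.length : Int) ∨ ∃ x ∈ col.drop (r.toNat + 1), x ≠ "." := by
            rcases hblk2 with hblk2 | ⟨row', hmem, hne⟩
            · left; omega
            · right
              refine ⟨(PySem.List.pyGet? row' c).getD "", ?_, hne⟩
              rw [hcol, ← List.map_drop]
              exact List.mem_map_of_mem hmem
          exact assemble (pvCellV grid c) col r rows hr0 hrows0 (by omega) hblock hf
        · exact assemble_stop (pvCellV grid c) col r rows hr0 (by omega) hneg (by omega) hf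
      · refine assemble_imm (pvCellV grid c) col r rows hrneg (by omega)
          (fun i h1 h2 => ?_) (fun h => ?_) (by rw [hlen]; exact hL) (by rw [hlen]; exact hR)
        · rw [hlen] at h1 ⊢
          exact cellV_neg grid c i h1 h2
        · rw [hlen] at h
          have h0 : ((0 : Nat) : Int) = (0 : Int) := rfl
          rw [← h0]
          exact cellV_col grid c 0 h
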